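-- pv_equiv track=rewrite | github.com/scipraxian/are-self-api | frontal_lobe/context_compressor.py | phase1_prune_tool_messages
-- ===== SOURCE A (Python) =====
-- from typing import Any, Callable, Dict, List, Optional, Sequence, Tuple
--
-- ROLE = 'role'
--
-- CONTENT = 'content'
--
-- ROLE_TOOL = 'tool'
--
-- NAME = 'name'
--
-- TOOL_PLACEHOLDER_PREFIX = '[Tool call to '
--
-- def _tool_display_name(message: Dict[str, Any]) -> str:
--     name = message.get(NAME)
--     if name:
--         return str(name)
--     return 'tool'
--
-- def phase1_prune_tool_messages(
--     messages: List[Dict[str, Any]],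
-- ) -> List[Dict[str, Any]]:
--     """Keep first 2 and last 2 tool results; replace middle with placeholders."""
--     tool_indices: List[int] = []
--     for i, msg in enumerate(messages):
--         if msg.get(ROLE) == ROLE_TOOL:
--             tool_indices.append(i)
--     if len(tool_indices) <= 4:
--         return list(messages)
--
--     out = [dict(m) for m in messages]
--     keep_set = set(tool_indices[:2] + tool_indices[-2:])
--     for idx in tool_indices:
--         if idx in keep_set:
--             continue
--         name = _tool_display_name(out[idx])
--         out[idx][CONTENT] = (
--             f'{TOOL_PLACEHOLDER_PREFIX}{name} — result summarized]'
--         )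
--     return out
-- ===== SOURCE B (Python) =====
-- ROLE = 'role'
-- CONTENT = 'content'
-- ROLE_TOOL = 'tool'
-- NAME = 'name'
-- TOOL_PLACEHOLDER_PREFIX = '[Tool call to '
--
--
-- def _tool_display_name(message):
--     name = message.get(NAME)
--     if name:
--         return str(name)
--     return 'tool'
--
--
-- def phase1_prune_tool_messages(messages):
--     """Single pass with an ordinal counter instead of an index list + keep set."""
--     total = sum(1 for m in messages if m.get(ROLE) == ROLE_TOOL)
--     if total <= 4:
--         return list(messages)
--     out = []
--     seen = 0
--     for m in messages:
--         m = dict(m)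
--         if m.get(ROLE) == ROLE_TOOL:
--             if 2 <= seen < total - 2:
--                 m[CONTENT] = (
--                     f'{TOOL_PLACEHOLDER_PREFIX}{_tool_display_name(m)} — result summarized]'
--                 )
--             seen += 1
--         out.append(m)
--     return out
-- ===== Notes on version B (the rewrite author's own statement) =====
-- stated objective: simpler
-- what changed: Replaces A's two-phase scheme (collect absolute tool indices, build a keep set of first/last two, then rewrite by random-access index assignment) with a count pass plus one forward pass that carries an ordinal counter of tool messages and rewrites a message when its ordinal lies in [2, total-2).
import Mathlib
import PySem

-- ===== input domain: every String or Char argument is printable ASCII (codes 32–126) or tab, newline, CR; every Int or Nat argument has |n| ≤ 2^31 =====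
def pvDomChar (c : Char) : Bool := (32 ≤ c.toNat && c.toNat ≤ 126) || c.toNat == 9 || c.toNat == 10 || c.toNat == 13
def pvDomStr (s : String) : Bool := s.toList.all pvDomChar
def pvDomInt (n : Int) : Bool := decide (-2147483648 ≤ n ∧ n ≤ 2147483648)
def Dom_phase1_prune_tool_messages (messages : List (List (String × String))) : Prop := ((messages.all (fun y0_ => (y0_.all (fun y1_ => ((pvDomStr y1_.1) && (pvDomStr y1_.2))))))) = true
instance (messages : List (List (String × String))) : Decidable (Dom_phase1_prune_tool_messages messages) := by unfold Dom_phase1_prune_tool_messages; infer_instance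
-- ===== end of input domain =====

-- B is a simpler decomposition of the same O(n) task: one counting pass plus one forward
-- rewrite pass with an ordinal counter, instead of A's index list + keep set + index assignment.

-- ===== PORT A =====
-- msg.get(ROLE) == ROLE_TOOL  (both Pythons contain this test verbatim)
def pvIsTool (m : List (String × String)) : Bool :=
  (PySem.Dict.mk m).get? "role" == some "tool"

-- _tool_display_name (defined in the module, used verbatim by both Pythons)
def pvToolDisplayName (m : List (String × String)) : String :=
  match (PySem.Dict.mk m).get? "name" with
  | some s => if s ≠ "" then s else "tool"   -- `if name:` — an empty string is falsy
  | none => "tool"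

-- out[idx][CONTENT] = f'{TOOL_PLACEHOLDER_PREFIX}{name} — result summarized]'
def pvRewrite (m : List (String × String)) : List (String × String) :=
  ((PySem.Dict.mk m).insert "content"
    ("[Tool call to " ++ pvToolDisplayName m ++ " — result summarized]")).items

-- body of A's rewrite loop; idx comes from enumerate, so 0 ≤ idx < len(out) always
def pvStepA (keep : PySem.Set Int) (out : List (List (String × String))) (idx : Int) :
    List (List (String × String)) :=
  if PySem.Set.contains keep idx then out
  else out.set idx.toNat (pvRewrite (PySem.List.pyGetD out idx []))

def phase1_prune_tool_messages (messages : List (List (String × String))) : List (List (String × String)) :=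
  let tool_indices :=
    (PySem.List.enumerate messages 0).foldl
      (fun acc p => if pvIsTool p.2 then acc ++ [p.1] else acc) ([] : List Int)
  if tool_indices.length ≤ 4 then messages
  else
    let out := messages.map (fun m => m)   -- [dict(m) for m in messages]: fresh copies, same values
    let keep := PySem.Set.ofList
      (PySem.List.slice tool_indices none (some 2) ++ PySem.List.slice tool_indices (some (-2)) none)
    tool_indices.foldl (pvStepA keep) out

-- ===== PORT B =====
-- the single rewrite pass of Source B, carrying the ordinal counter `seen`
def pvGoB (total : Int) (seen : Int) : List (List (String × String)) → List (List (String × String))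
  | [] => []
  | m :: rest =>
    if pvIsTool m then
      (if 2 ≤ seen ∧ seen < total - 2 then pvRewrite m else m) :: pvGoB total (seen + 1) rest
    else m :: pvGoB total seen rest

def phase1_prune_tool_messages_alt (messages : List (List (String × String))) : List (List (String × String)) :=
  let total := messages.foldl (fun n m => if pvIsTool m then n + 1 else n) (0 : Int)
  if total ≤ 4 then messages
  else pvGoB total 0 messages

-- ===== PRECONDITION & SPEC =====
def Spec_phase1_prune_tool_messages (messages : List (List (String × String))) (out : List (List (String × String))) : Prop := out = phase1_prune_tool_messages_alt messages
instance (messages : List (List (String × String))) (out : List (List (String × String))) : Decidable (Spec_phase1_prune_tool_messages messages out) := by unfold Spec_phase1_prune_tool_messages; infer_instance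

-- ===== CLAIM (what is proved, stated in full; the proofs are below) =====
def Claim_equal_phase1_prune_tool_messages : Prop := ∀ (messages : List (List (String × String))), Dom_phase1_prune_tool_messages messages → Spec_phase1_prune_tool_messages messages (phase1_prune_tool_messages messages)

-- ===== LEMMAS AND PROOFS =====

-- the list of tool indices A builds, in closed form
def pvTi (messages : List (List (String × String))) : List Int :=
  ((PySem.List.enumerate messages 0).filter (fun p => pvIsTool p.2)).map (·.1)

theorem pvTiA_eq (messages : List (List (String × String))) :
    (PySem.List.enumerate messages 0).foldl
      (fun acc p => if pvIsTool p.2 then acc ++ [p.1] else acc) ([] : List Int) = pvTi messages := by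
  have h := PySem.List.foldl_append_if (fun q : Int × List (String × String) => pvIsTool q.2)
    (fun q => q.1) (PySem.List.enumerate messages 0) []
  simpa [pvTi] using h

theorem pvLength_pvTi (messages : List (List (String × String))) :
    (pvTi messages).length = messages.countP pvIsTool := by
  unfold pvTi
  rw [List.length_map, ← List.countP_eq_length_filter]
  conv_rhs => rw [← PySem.List.map_snd_enumerate messages 0]
  rw [List.countP_map]
  rfl

theorem pvMem_pvTi (messages : List (List (String × String))) (i : Nat) :
    ((i : Int) ∈ pvTi messages) ↔ ∃ h : i < messages.length, pvIsTool messages[i] = true := by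
  unfold pvTi
  simp only [List.mem_map, List.mem_filter, PySem.List.mem_enumerate_iff]
  constructor
  · rintro ⟨p, ⟨⟨k, hk, rfl⟩, htool⟩, hfst⟩
    simp only [zero_add] at hfst htool
    have hk' : k = i := by exact_mod_cast hfst
    subst hk'
    exact ⟨hk, htool⟩
  · rintro ⟨h, htool⟩
    exact ⟨((i : Int), messages[i]), ⟨⟨i, h, by simp⟩, htool⟩, rfl⟩

theorem pvRange_pvTi (messages : List (List (String × String))) :
    ∀ x ∈ pvTi messages, 0 ≤ x ∧ x.toNat < messages.length := by
  intro x hx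
  unfold pvTi at hx
  simp only [List.mem_map, List.mem_filter, PySem.List.mem_enumerate_iff] at hx
  obtain ⟨p, ⟨⟨k, hk, rfl⟩, _⟩, rfl⟩ := hx
  simp only [zero_add]
  constructor
  · exact Int.natCast_nonneg k
  · simpa using hk

theorem pvPairwise_pvTi (messages : List (List (String × String))) :
    (pvTi messages).Pairwise (· < ·) := by
  unfold pvTi
  rw [List.pairwise_map]
  exact List.Pairwise.filter _ (PySem.List.pairwise_lt_enumerate messages 0)

theorem pvNodup_pvTi (messages : List (List (String × String))) : (pvTi messages).Nodup :=
  (pvPairwise_pvTi messages).imp (fun h => ne_of_lt h)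

theorem pvCountP_aux (messages : List (List (String × String))) :
    ∀ (s : Int) (i : Nat),
    (((PySem.List.enumerate messages s).filter (fun p => pvIsTool p.2)).map (·.1)).countP
      (fun y => decide (y < s + (i : Int))) = (messages.take i).countP pvIsTool := by
  induction messages with
  | nil => intro s i; simp [PySem.List.enumerate_nil]
  | cons m rest ih =>
    intro s i
    rw [PySem.List.enumerate_cons]
    cases i with
    | zero =>
      simp only [Nat.cast_zero, add_zero, List.take_zero, List.countP_nil]
      rw [List.countP_eq_zero]
      intro y hy
      simp only [List.mem_map, List.mem_filter] at hy
      obtain ⟨p, ⟨hp, _⟩, rfl⟩ := hy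
      rcases List.mem_cons.1 hp with rfl | hp'
      · simp
      · obtain ⟨k, hk, rfl⟩ := (PySem.List.mem_enumerate_iff rest (s + 1) p).1 hp'
        simp only [decide_eq_true_eq, not_lt]
        omega
    | succ i =>
      rw [List.filter_cons, List.take_succ_cons, List.countP_cons]
      have hshift : s + ((i + 1 : Nat) : Int) = (s + 1) + (i : Int) := by push_cast; ring
      by_cases ht : pvIsTool m = true
      · simp only [ht, if_pos trivial, List.map_cons, List.countP_cons]
        rw [hshift, ih (s + 1) i]
        have : (decide (s < s + 1 + (i : Int))) = true := by simp; omega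
        simp [this]
      · simp only [ht, if_false, Bool.false_eq_true]
        rw [hshift, ih (s + 1) i]
        simp

theorem pvMem_take_sorted (L : List Int) :
    ∀ (k : Nat) (x : Int), L.Pairwise (· < ·) → x ∈ L →
    (x ∈ L.take k ↔ L.countP (fun y => decide (y < x)) < k) := by
  induction L with
  | nil => intro k x _ hx; simp at hx
  | cons a L ih =>
    intro k x h hx
    have hhead := (List.pairwise_cons.1 h).1
    have htail := (List.pairwise_cons.1 h).2
    cases k with
    | zero => simp
    | succ k =>
      rw [List.take_succ_cons, List.countP_cons]
      rcases List.mem_cons.1 hx with rfl | hx'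
      · have h0 : L.countP (fun y => decide (y < x)) = 0 :=
          List.countP_eq_zero.2 (fun y hy => by
            simp only [decide_eq_true_eq, not_lt]
            exact le_of_lt (hhead y hy))
        simp [h0]
      · have hax : a < x := hhead x hx'
        have hne : x ≠ a := ne_of_gt hax
        rw [List.mem_cons]
        simp only [hne, false_or]
        rw [ih k x htail hx']
        have : (decide (a < x)) = true := by simpa using hax
        simp only [this, if_true]
        omega

theorem pvMem_drop_sorted (L : List Int) (k : Nat) (x : Int)
    (h : L.Pairwise (· < ·)) (hx : x ∈ L) :
    x ∈ L.drop k ↔ ¬ L.countP (fun y => decide (y < x)) < k := by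
  have hnd : L.Nodup := h.imp (fun hlt => ne_of_lt hlt)
  have hdisj := List.disjoint_take_drop (l := L) hnd (le_refl k)
  have hsplit : x ∈ L.take k ∨ x ∈ L.drop k := by
    rw [← List.take_append_drop k L] at hx
    exact List.mem_append.1 hx
  rw [← pvMem_take_sorted L k x h hx]
  constructor
  · intro hd hcount
    exact hdisj hcount hd
  · intro hnt
    rcases hsplit with h1 | h1
    · exact absurd h1 hnt
    · exact h1

theorem pvFoldA_getElem? (keep : PySem.Set Int) (L : List Int) :
    ∀ (out : List (List (String × String))), L.Nodup →
    (∀ x ∈ L, 0 ≤ x ∧ x.toNat < out.length) → ∀ (i : Nat),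
    (L.foldl (pvStepA keep) out)[i]? =
      if (i : Int) ∈ L ∧ PySem.Set.contains keep (i : Int) = false then
        out[i]?.map pvRewrite
      else out[i]? := by
  induction L with
  | nil => intro out _ _ i; simp
  | cons a L ih =>
    intro out hnd hrange i
    rw [List.foldl_cons]
    have ha := hrange a (List.mem_cons_self)
    have hanotin : a ∉ L := (List.nodup_cons.1 hnd).1
    have hlen' : (pvStepA keep out a).length = out.length := by
      unfold pvStepA; split <;> simp
    have hIH := ih (pvStepA keep out a) (List.nodup_cons.1 hnd).2
      (fun x hx => by rw [hlen']; exact hrange x (List.mem_cons_of_mem _ hx)) i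
    rw [hIH]
    by_cases hk : PySem.Set.contains keep a = true
    · have hout : pvStepA keep out a = out := by unfold pvStepA; rw [if_pos hk]
      rw [hout]
      congr 1
      · -- conditions agree: if ↑i = a then keep contains it, killing both sides
        simp only [List.mem_cons, eq_iff_iff]
        constructor
        · rintro ⟨hm, hc⟩; exact ⟨Or.inr hm, hc⟩
        · rintro ⟨hm, hc⟩
          rcases hm with rfl | hm
          · rw [hk] at hc; cases hc
          · exact ⟨hm, hc⟩
    · have hkf : PySem.Set.contains keep a = false := by
        cases hcc : PySem.Set.contains keep a
        · rfl
        · exact absurd hcc hk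
      have hout : pvStepA keep out a
          = out.set a.toNat (pvRewrite (PySem.List.pyGetD out a [])) := by
        unfold pvStepA; rw [if_neg hk]
      have hgetd : PySem.List.pyGetD out a [] = out.getD a.toNat [] := by
        conv_lhs => rw [← Int.toNat_of_nonneg ha.1]
        rw [PySem.List.pyGetD_natCast]
      by_cases hiL : (i : Int) ∈ L
      · -- i was touched later (or not), but i ≠ a, so the set at a is invisible
        have hne : a.toNat ≠ i := by
          intro hcontra
          apply hanotin
          rw [← hcontra] at hiL
          rwa [Int.toNat_of_nonneg ha.1] at hiL
        rw [hout, List.getElem?_set, if_neg hne]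
        have hcond : ((i : Int) ∈ a :: L ∧ PySem.Set.contains keep (i : Int) = false)
            ↔ ((i : Int) ∈ L ∧ PySem.Set.contains keep (i : Int) = false) := by
          simp only [List.mem_cons]
          constructor
          · rintro ⟨_, hc⟩; exact ⟨hiL, hc⟩
          · rintro ⟨hm, hc⟩; exact ⟨Or.inr hm, hc⟩
        rw [if_congr hcond rfl rfl]
      · simp only [hiL, false_and, if_false]
        by_cases hia : i = a.toNat
        · have hia' : (i : Int) = a := by rw [hia]; exact Int.toNat_of_nonneg ha.1
          have hilt : i < out.length := by rw [hia]; exact ha.2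
          rw [hout, List.getElem?_set, if_pos hia.symm, if_pos ha.2]
          have hcond : ((i : Int) ∈ a :: L ∧ PySem.Set.contains keep (i : Int) = false) := by
            rw [hia']; exact ⟨List.mem_cons_self, hkf⟩
          rw [if_pos hcond]
          rw [hgetd, List.getElem?_eq_getElem hilt, Option.map_some]
          congr 1
          rw [← hia, List.getD_eq_getElem?_getD, List.getElem?_eq_getElem hilt]
          rfl
        · have hcond : ¬ ((i : Int) ∈ a :: L ∧ PySem.Set.contains keep (i : Int) = false) := by
            rintro ⟨hm, _⟩
            rcases List.mem_cons.1 hm with heq | hm'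
            · exact hia (by omega)
            · exact hiL hm'
          rw [if_neg hcond, hout, List.getElem?_set, if_neg (fun hcontra => hia hcontra.symm)]

theorem pvGoB_getElem? (total : Int) (l : List (List (String × String))) :
    ∀ (seen : Int) (i : Nat),
    (pvGoB total seen l)[i]? = l[i]?.map (fun m =>
      if pvIsTool m ∧ 2 ≤ seen + ((l.take i).countP pvIsTool : Int) ∧
          seen + ((l.take i).countP pvIsTool : Int) < total - 2 then pvRewrite m else m) := by
  induction l with
  | nil => intro seen i; simp [pvGoB]
  | cons m rest ih =>
    intro seen i
    cases i with
    | zero =>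
      by_cases ht : pvIsTool m = true <;>
        simp [pvGoB, ht]
    | succ i =>
      have htake : ((m :: rest).take (i + 1)) = m :: rest.take i := List.take_succ_cons
      by_cases ht : pvIsTool m = true
      · have heq : seen + (((m :: rest).take (i + 1)).countP pvIsTool : Int)
            = (seen + 1) + ((rest.take i).countP pvIsTool : Int) := by
          rw [htake, List.countP_cons]
          simp only [ht, if_true]
          push_cast; ring
        rw [heq]
        simp only [pvGoB, ht, if_true, List.getElem?_cons_succ]
        exact ih (seen + 1) i
      · have heq : seen + (((m :: rest).take (i + 1)).countP pvIsTool : Int)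
            = seen + ((rest.take i).countP pvIsTool : Int) := by
          rw [htake, List.countP_cons]
          simp [ht]
        rw [heq]
        simp only [pvGoB, ht, Bool.false_eq_true, if_false, List.getElem?_cons_succ]
        exact ih seen i

theorem pvTotalB_eq (messages : List (List (String × String))) :
    messages.foldl (fun n m => if pvIsTool m then n + 1 else n) (0 : Int)
      = (messages.countP pvIsTool : Int) := by
  rw [PySem.List.foldl_if_add_one pvIsTool messages 0, zero_add]

theorem pvContains_keep (messages : List (List (String × String))) (i : Nat)
    (hmem : (i : Int) ∈ pvTi messages) :
    PySem.Set.contains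
      (PySem.Set.ofList
        (PySem.List.slice (pvTi messages) none (some 2) ++
          PySem.List.slice (pvTi messages) (some (-2)) none)) (i : Int) = true
    ↔ ((messages.take i).countP pvIsTool < 2 ∨
        messages.countP pvIsTool - 2 ≤ (messages.take i).countP pvIsTool) := by
  have hsl1 : PySem.List.slice (pvTi messages) none (some 2) = (pvTi messages).take 2 := by
    rw [PySem.List.slice_to _ (by norm_num : (0 : Int) ≤ 2)]; rfl
  have hsl2 : PySem.List.slice (pvTi messages) (some (-2)) none
      = (pvTi messages).drop ((pvTi messages).length - 2) :=
    PySem.List.slice_from_neg_ofNat _ 2 (by norm_num)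
  have hcnt : (pvTi messages).countP (fun y => decide (y < (i : Int)))
      = (messages.take i).countP pvIsTool := by
    have h0 := pvCountP_aux messages 0 i
    rw [show ((0 : Int) + (i : Int)) = (i : Int) by ring] at h0
    unfold pvTi
    exact h0
  have hcontains : PySem.Set.contains
      (PySem.Set.ofList
        (PySem.List.slice (pvTi messages) none (some 2) ++
          PySem.List.slice (pvTi messages) (some (-2)) none)) (i : Int) = true
      ↔ (i : Int) ∈ (pvTi messages).take 2 ∨
        (i : Int) ∈ (pvTi messages).drop ((pvTi messages).length - 2) := by
    rw [hsl1, hsl2]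
    constructor
    · intro hc
      have : (i : Int) ∈ PySem.Set.ofList
          ((pvTi messages).take 2 ++ (pvTi messages).drop ((pvTi messages).length - 2)) := by
        simpa [PySem.Set.contains] using hc
      rw [PySem.Set.mem_ofList] at this
      exact List.mem_append.1 this
    · intro hc
      have : (i : Int) ∈ PySem.Set.ofList
          ((pvTi messages).take 2 ++ (pvTi messages).drop ((pvTi messages).length - 2)) :=
        (PySem.Set.mem_ofList _ _).2 (List.mem_append.2 hc)
      simpa [PySem.Set.contains] using this
  rw [hcontains,
    pvMem_take_sorted (pvTi messages) 2 (i : Int) (pvPairwise_pvTi messages) hmem,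
    pvMem_drop_sorted (pvTi messages) ((pvTi messages).length - 2) (i : Int)
      (pvPairwise_pvTi messages) hmem,
    hcnt, pvLength_pvTi]
  omega

-- ===== VERDICT (by name: the statement is the Claim_ definition above) =====
theorem phase1_prune_tool_messages_spec : Claim_equal_phase1_prune_tool_messages := by
  intro messages _hdom
  unfold Spec_phase1_prune_tool_messages
  unfold phase1_prune_tool_messages phase1_prune_tool_messages_alt
  simp only [pvTiA_eq, pvTotalB_eq, List.map_id']
  rw [pvLength_pvTi]
  by_cases h4 : messages.countP pvIsTool ≤ 4
  · rw [if_pos h4, if_pos (by exact_mod_cast h4)]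
  · rw [if_neg h4, if_neg (by
      intro hc
      exact h4 (by exact_mod_cast hc))]
    apply List.ext_getElem?
    intro i
    rw [pvFoldA_getElem? _ (pvTi messages) messages (pvNodup_pvTi messages)
      (pvRange_pvTi messages) i]
    rw [pvGoB_getElem? _ messages 0 i]
    by_cases hi : i < messages.length
    · have hm : messages[i]? = some messages[i] := List.getElem?_eq_getElem hi
      rw [hm]
      simp only [Option.map_some]
      by_cases ht : pvIsTool messages[i] = true
      · have hmem : (i : Int) ∈ pvTi messages := (pvMem_pvTi messages i).2 ⟨hi, ht⟩
        have hkeep := pvContains_keep messages i hmem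
        by_cases hcc : 2 ≤ (messages.take i).countP pvIsTool ∧
            (messages.take i).countP pvIsTool < messages.countP pvIsTool - 2
        · have hnk : PySem.Set.contains
              (PySem.Set.ofList
                (PySem.List.slice (pvTi messages) none (some 2) ++
                  PySem.List.slice (pvTi messages) (some (-2)) none)) (i : Int) = false := by
            cases hv : PySem.Set.contains
              (PySem.Set.ofList
                (PySem.List.slice (pvTi messages) none (some 2) ++
                  PySem.List.slice (pvTi messages) (some (-2)) none)) (i : Int)
            · rfl
            · exfalso; rcases hkeep.1 hv with h1 | h1 <;> omega
          rw [if_pos ⟨hmem, hnk⟩, if_pos ⟨ht, by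
            constructor <;> omega⟩]
        · have hk2 : PySem.Set.contains
              (PySem.Set.ofList
                (PySem.List.slice (pvTi messages) none (some 2) ++
                  PySem.List.slice (pvTi messages) (some (-2)) none)) (i : Int) = true := by
            apply hkeep.2
            omega
          rw [if_neg (by
            rintro ⟨_, hcf⟩
            rw [hk2] at hcf
            cases hcf), if_neg (by
            rintro ⟨_, hb1, hb2⟩
            apply hcc
            constructor <;> omega)]
      · rw [if_neg (by
          rintro ⟨hmem, _⟩
          obtain ⟨_, ht'⟩ := (pvMem_pvTi messages i).1 hmem
          exact ht ht'), if_neg (by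
          rintro ⟨ht', _⟩
          exact ht ht')]
    · have hm : messages[i]? = none := List.getElem?_eq_none (by omega)
      rw [hm]
      simp
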